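-- pv_equiv track=rewrite | github.com/roadtomoab/engineering_method | practice_problems/practical_problems/shift_chars.py | shiftChars
-- ===== SOURCE A (Python) =====
-- def shiftChars(s):
--
--     result = ""
--
--     for i in range(len(s)):
--         if s[i] == " ":
--             result += " "
--         elif s[i] == "z":
--             result += "a"
--         elif s[i] == "Z":
--             result += "A"
--         else:
--             next = ord(s[i]) + 1
--             result += chr(next)
--
--     return result
-- ===== SOURCE B (Python) =====
-- def shiftChars(s):
--     table = {}
--     for c in set(s):
--         if c == " ":
--             table[ord(c)] = ord(" ")
--         elif c == "z":
--             table[ord(c)] = ord("a")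
--         elif c == "Z":
--             table[ord(c)] = ord("A")
--         else:
--             table[ord(c)] = ord(c) + 1
--     return s.translate(table)
-- ===== Notes on version B (the rewrite author's own statement) =====
-- stated objective: idiomatic
-- what changed: Replaces the per-index branch-and-concatenate loop by building a translation table over the distinct characters of s once and applying str.translate in one library call.
import Mathlib
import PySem

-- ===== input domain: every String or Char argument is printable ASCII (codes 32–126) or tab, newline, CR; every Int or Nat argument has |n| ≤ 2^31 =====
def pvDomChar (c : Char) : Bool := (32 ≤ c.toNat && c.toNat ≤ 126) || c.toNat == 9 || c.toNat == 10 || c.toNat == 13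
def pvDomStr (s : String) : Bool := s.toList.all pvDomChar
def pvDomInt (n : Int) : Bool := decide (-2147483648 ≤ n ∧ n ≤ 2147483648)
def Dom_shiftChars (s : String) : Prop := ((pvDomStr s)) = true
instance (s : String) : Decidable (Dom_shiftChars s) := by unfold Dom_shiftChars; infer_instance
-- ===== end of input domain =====

-- B builds a shift table over the distinct characters of s and applies it in one translate pass
-- instead of A's per-index branch-and-concatenate loop; equivalence is total.

-- ===== PORT A =====
def shiftChars (s : String) : String :=
  let cs := s.toList
  let result := (PySem.List.pyRange 0 (cs.length : Int) 1).foldl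
    (fun result i =>
      let c := PySem.List.pyGetD cs i ' '
      if c = ' ' then result ++ [' ']
      else if c = 'z' then result ++ ['a']
      else if c = 'Z' then result ++ ['A']
      else result ++ [Char.ofNat (c.toNat + 1)]) []
  String.ofList result

-- ===== PORT B =====
-- B's table value for a distinct character c (the ord stored in the Python dict)
def pvShiftOrd (c : Char) : Nat :=
  if c = ' ' then 32
  else if c = 'z' then 97
  else if c = 'Z' then 65
  else c.toNat + 1

def shiftChars_alt (s : String) : String :=
  let table : PySem.Dict Nat Nat :=
    (PySem.Set.ofList s.toList).foldl
      (fun d c => d.insert c.toNat (pvShiftOrd c)) PySem.Dict.empty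
  -- str.translate: each character's ordinal is looked up; absent ordinals stay unchanged
  String.ofList (s.toList.map (fun c => Char.ofNat (table.getD c.toNat c.toNat)))

-- ===== PRECONDITION & SPEC =====
def Spec_shiftChars (s : String) (out : String) : Prop := out = shiftChars_alt s
instance (s : String) (out : String) : Decidable (Spec_shiftChars s out) := by unfold Spec_shiftChars; infer_instance

-- ===== CLAIM (what is proved, stated in full; the proofs are below) =====
def Claim_equal_shiftChars : Prop := ∀ (s : String), Dom_shiftChars s → Spec_shiftChars s (shiftChars s)

-- ===== LEMMAS AND PROOFS =====

-- A's per-character result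
def pvShiftA (c : Char) : Char :=
  if c = ' ' then ' '
  else if c = 'z' then 'a'
  else if c = 'Z' then 'A'
  else Char.ofNat (c.toNat + 1)

theorem pvShiftA_eq_ofNat_shiftOrd (c : Char) :
    pvShiftA c = Char.ofNat (pvShiftOrd c) := by
  unfold pvShiftA pvShiftOrd
  split_ifs <;> rfl

theorem shiftChars_eq_map (s : String) :
    shiftChars s = String.ofList (s.toList.map pvShiftA) := by
  unfold shiftChars
  have hfun : (fun (result : List Char) (i : Int) =>
      let c := PySem.List.pyGetD s.toList i ' '
      if c = ' ' then result ++ [' ']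
      else if c = 'z' then result ++ ['a']
      else if c = 'Z' then result ++ ['A']
      else result ++ [Char.ofNat (c.toNat + 1)]) =
      (fun (result : List Char) (i : Int) =>
        result ++ [pvShiftA (PySem.List.pyGetD s.toList i ' ')]) := by
    funext result i
    simp only [pvShiftA]
    split_ifs <;> rfl
  simp only [hfun, PySem.List.foldl_append_singleton_eq_map, List.nil_append]
  rw [show (List.map (fun i => pvShiftA (PySem.List.pyGetD s.toList i ' '))
       (PySem.List.pyRange 0 (s.toList.length : Int) 1)) =
      ((PySem.List.pyRange 0 (s.toList.length : Int) 1).map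
        (fun i => PySem.List.pyGetD s.toList i ' ')).map pvShiftA by
    rw [List.map_map]; rfl]
  rw [PySem.List.map_pyGetD_pyRange_zero']

theorem pv_getD_foldl_ne (L : List Char) (d : PySem.Dict Nat Nat) (k x : Nat)
    (h : ∀ b ∈ L, b.toNat ≠ k) :
    (L.foldl (fun d c => d.insert c.toNat (pvShiftOrd c)) d).getD k x = d.getD k x := by
  induction L generalizing d with
  | nil => rfl
  | cons a t ih =>
    simp only [List.foldl_cons]
    rw [ih _ (fun b hb => h b (List.mem_cons_of_mem a hb)),
      PySem.Dict.getD_insert_of_ne]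
    exact fun he => h a (List.mem_cons_self) (he ▸ rfl)

theorem pv_getD_foldl_mem (L : List Char) (d : PySem.Dict Nat Nat) (c : Char) (x : Nat)
    (hmem : c ∈ L) (hnd : L.Nodup) :
    (L.foldl (fun d c => d.insert c.toNat (pvShiftOrd c)) d).getD c.toNat x = pvShiftOrd c := by
  induction L generalizing d with
  | nil => cases hmem
  | cons a t ih =>
    simp only [List.foldl_cons]
    rcases List.mem_cons.mp hmem with h | h
    · subst h
      rw [pv_getD_foldl_ne]
      · exact PySem.Dict.getD_insert_self _ _ _ _
      · intro b hb he
        have hbc : b = c := by rw [← Char.ofNat_toNat b, ← Char.ofNat_toNat c, he]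
        exact (List.nodup_cons.mp hnd).1 (hbc ▸ hb)
    · exact ih _ h (List.nodup_cons.mp hnd).2

-- ===== VERDICT (by name: the statement is the Claim_ definition above) =====
theorem shiftChars_spec : Claim_equal_shiftChars := by
  intro s _
  unfold Spec_shiftChars shiftChars_alt
  rw [shiftChars_eq_map]
  congr 1
  apply List.map_congr_left
  intro c hc
  rw [pv_getD_foldl_mem _ _ _ _ ((PySem.Set.mem_ofList _ _).mpr hc)
      (PySem.Set.nodup_ofList _), pvShiftA_eq_ofNat_shiftOrd]
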